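-- pv_equiv track=rewrite | github.com/mastoltejr/advent_of_code_2020 | day7/stefan/day7.py | traverse_topo
-- ===== SOURCE A (Python) =====
-- def traverse_topo(current, topology, visited = None):
--     visited = {} if visited is None else visited
--     if current not in visited:
--         total = 0
--         for bag, count in topology[current]:
--             subtotal, _ = traverse_topo(bag, topology, visited)
--             total += count * (subtotal + 1)
--         visited[current] = total
--     return visited[current], len(visited)
-- ===== SOURCE B (Python) =====
-- def traverse_topo(current, topology, visited=None):
--     # Iterative post-order DFS: A's recursion defunctionalized into an explicit
--     # stack of (node, next-child-index, running-total) frames. Performs the same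
--     # memo insertions into `visited`, in the same order, as the recursive version.
--     visited = {} if visited is None else visited
--     stack = [(current, 0, 0)]
--     ret = 0
--     while stack:
--         node, i, total = stack.pop()
--         if i == 0 and node in visited:
--             ret = visited[node]
--             continue
--         children = topology[node]
--         if i > 0:
--             _, count = children[i - 1]
--             total += count * (ret + 1)
--         if i < len(children):
--             bag, _ = children[i]
--             stack.append((node, i + 1, total))
--             stack.append((bag, 0, 0))
--         else:
--             visited[node] = total
--             ret = total
--     return visited[current], len(visited)
-- ===== Notes on version B (the rewrite author's own statement) =====
-- stated objective: alternative
-- what changed: A's memoized recursion is replaced by an iterative post-order DFS: an explicit stack of (node, next-child-index, running-total) frames drives the same traversal, performing identical memo insertions without recursion.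
import Mathlib
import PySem

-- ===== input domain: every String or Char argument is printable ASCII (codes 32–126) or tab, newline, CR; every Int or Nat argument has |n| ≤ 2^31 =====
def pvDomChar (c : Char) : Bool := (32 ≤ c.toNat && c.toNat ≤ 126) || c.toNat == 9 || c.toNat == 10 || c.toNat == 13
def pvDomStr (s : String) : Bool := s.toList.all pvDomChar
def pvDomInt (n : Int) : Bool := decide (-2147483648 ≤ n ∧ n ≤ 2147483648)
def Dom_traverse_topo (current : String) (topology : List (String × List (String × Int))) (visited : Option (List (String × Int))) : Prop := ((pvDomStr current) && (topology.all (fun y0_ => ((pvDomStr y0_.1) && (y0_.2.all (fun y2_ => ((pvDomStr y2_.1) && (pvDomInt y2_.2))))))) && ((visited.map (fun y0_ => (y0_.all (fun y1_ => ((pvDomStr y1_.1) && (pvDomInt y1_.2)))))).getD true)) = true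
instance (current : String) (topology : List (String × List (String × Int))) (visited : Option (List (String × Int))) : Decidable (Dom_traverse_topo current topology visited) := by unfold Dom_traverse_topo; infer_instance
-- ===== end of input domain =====

-- B replaces A's memoized recursion by an explicit iterative stack machine (a defunctionalized
-- post-order DFS). Same return value; the same in-place insertions into a caller-supplied
-- `visited` dict happen in Python (equivalence proved here is about the return value). Both
-- ports carry a fuel guard (their `none` branch is unreachable on Pre_-admitted inputs).

-- ===== PORT A =====
-- A's inner `for bag, count in topology[current]` loop; `go` is the recursive call.
def pvAgoList (go : String → PySem.Dict String Int → Option ((Int × Int) × PySem.Dict String Int)) :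
    List (String × Int) → Int → PySem.Dict String Int → Option (Int × PySem.Dict String Int)
  | [], total, vis => some (total, vis)
  | (bag, count) :: rest, total, vis =>
    match go bag vis with
    | none => none
    | some ((subtotal, _), vis') => pvAgoList go rest (total + count * (subtotal + 1)) vis'

-- A's recursion (fuel = recursion-depth guard; a KeyError on a key missing from `topology`
-- is excluded by Pre_, where `getD _ []` is never reached on a missing key).
def pvAgo (td : PySem.Dict String (List (String × Int))) :
    Nat → String → PySem.Dict String Int → Option ((Int × Int) × PySem.Dict String Int)
  | 0, _, _ => none
  | fuel + 1, current, vis =>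
    if vis.contains current then
      some ((vis.getD current 0, (vis.size : Int)), vis)
    else
      match pvAgoList (fun b v => pvAgo td fuel b v) (td.getD current []) 0 vis with
      | none => none
      | some (total, vis') =>
        some (((vis'.insert current total).getD current 0, ((vis'.insert current total).size : Int)),
              vis'.insert current total)

def traverse_topo (current : String) (topology : List (String × List (String × Int))) (visited : Option (List (String × Int))) : Int × Int :=
  let td := PySem.Dict.ofList topology
  let vd := match visited with | none => (PySem.Dict.empty : PySem.Dict String Int) | some l => PySem.Dict.ofList l
  match pvAgo td (topology.length + 1) current vd with
  | some (p, _) => p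
  | none => (0, 0)      -- fuel exhausted: unreachable under Pre_

-- ===== PORT B =====
-- largest child-list length in the topology (only used to size B's fuel guard)
def pvMaxChild (td : PySem.Dict String (List (String × Int))) : Nat :=
  (td.items.map (fun p => p.2.length)).foldl max 0

-- B's while loop: a stack of (node, next child index, running total) frames; `ret` is the
-- value produced by the most recently finished node.
def pvBrun (td : PySem.Dict String (List (String × Int))) :
    Nat → List (String × Nat × Int) → Int → PySem.Dict String Int → Option (Int × PySem.Dict String Int)
  | _, [], ret, vis => some (ret, vis)
  | 0, _ :: _, _, _ => none
  | fuel + 1, (node, i, total) :: rest, ret, vis =>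
    if i == 0 && vis.contains node then
      pvBrun td fuel rest (vis.getD node 0) vis
    else
      let children := td.getD node []
      let total' := if 0 < i then total + ((children[i-1]?).getD ("", 0)).2 * (ret + 1) else total
      match children[i]? with
      | some (bag, _) => pvBrun td fuel ((bag, 0, 0) :: (node, i + 1, total') :: rest) ret vis
      | none => pvBrun td fuel rest total' (vis.insert node total')

def traverse_topo_alt (current : String) (topology : List (String × List (String × Int))) (visited : Option (List (String × Int))) : Int × Int :=
  let td := PySem.Dict.ofList topology
  let vd := match visited with | none => (PySem.Dict.empty : PySem.Dict String Int) | some l => PySem.Dict.ofList l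
  match pvBrun td ((pvMaxChild td + 2) ^ (topology.length + 1)) [(current, 0, 0)] 0 vd with
  | some (_, vis) => (vis.getD current 0, (vis.size : Int))
  | none => (0, 0)      -- fuel exhausted: unreachable under Pre_

-- ===== PRECONDITION & SPEC =====
-- `pvGood td vd k s`: node `s` lies in the k-th bounded-height core of the dependency graph —
-- it is already memoized in `visited`, or it is a key of `topology` all of whose children lie
-- in the (k-1)-th core. A node is in some core iff every bag reachable from it through
-- unmemoized nodes is a key and no cycle is reachable; core index = height ≤ number of keys.
def pvGood (td : PySem.Dict String (List (String × Int))) (vd : PySem.Dict String Int) :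
    Nat → String → Bool
  | 0, s => vd.contains s
  | k + 1, s =>
    pvGood td vd k s || (td.contains s && (td.getD s []).all (fun p => pvGood td vd k p.1))

-- Pre_ excludes exactly the inputs on which Python A raises: a KeyError (some unmemoized bag
-- reachable from `current` is missing from `topology`) or a RecursionError (a cycle is
-- reachable from `current` through unmemoized bags). On every input where A returns, `current`
-- has a finite height ≤ len(topology) in this graph, so Pre_ holds.
def Pre_traverse_topo (current : String) (topology : List (String × List (String × Int))) (visited : Option (List (String × Int))) : Prop :=
  let td := PySem.Dict.ofList topology
  let vd := match visited with | none => (PySem.Dict.empty : PySem.Dict String Int) | some l => PySem.Dict.ofList l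
  pvGood td vd topology.length current = true

instance (current : String) (topology : List (String × List (String × Int))) (visited : Option (List (String × Int))) : Decidable (Pre_traverse_topo current topology visited) := by
  unfold Pre_traverse_topo; infer_instance

def pvWitness_traverse_topo : String × (List (String × List (String × Int))) × (Option (List (String × Int))) :=
  ("shiny gold", [("faded blue", []), ("shiny gold", [("faded blue", 2)])], some [("dotted black", 7)])

def Spec_traverse_topo (current : String) (topology : List (String × List (String × Int))) (visited : Option (List (String × Int))) (out : Int × Int) : Prop := out = traverse_topo_alt current topology visited
instance (current : String) (topology : List (String × List (String × Int))) (visited : Option (List (String × Int))) (out : Int × Int) : Decidable (Spec_traverse_topo current topology visited out) := by unfold Spec_traverse_topo; infer_instance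

-- ===== CLAIM (what is proved, stated in full; the proofs are below) =====
def Claim_equal_traverse_topo : Prop := ∀ (current : String) (topology : List (String × List (String × Int))) (visited : Option (List (String × Int))), Dom_traverse_topo current topology visited → Pre_traverse_topo current topology visited → Spec_traverse_topo current topology visited (traverse_topo current topology visited)

-- ===== LEMMAS AND PROOFS =====
theorem pvAgo_shape (td : PySem.Dict String (List (String × Int))) (f : Nat) (node : String)
    (vis : PySem.Dict String Int) (r : (Int × Int) × PySem.Dict String Int)
    (h : pvAgo td f node vis = some r) : r.1 = (r.2.getD node 0, (r.2.size : Int)) := by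
  match f with
  | 0 => simp [pvAgo] at h
  | f + 1 =>
    by_cases hc : vis.contains node = true
    · simp [pvAgo, hc] at h; subst h; rfl
    · simp only [pvAgo, hc, Bool.false_eq_true, if_false] at h
      rcases hh : pvAgoList (fun b v => pvAgo td f b v) (td.getD node []) 0 vis with _ | ⟨t', vis₂⟩
      · rw [hh] at h; simp at h
      · rw [hh] at h; simp at h; rw [← h]; simp [PySem.Dict.getD_insert_self]

theorem pvListAdequate (td : PySem.Dict String (List (String × Int))) (vd : PySem.Dict String Int)
    (f : Nat) (P : String → Prop)
    (H : ∀ bag vis, P bag → (∀ s, vd.contains s = true → vis.contains s = true) →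
      ∃ r, pvAgo td f bag vis = some r ∧ ∀ s, vis.contains s = true → r.2.contains s = true) :
    ∀ (cs : List (String × Int)) (total : Int) (vis : PySem.Dict String Int),
      (∀ p ∈ cs, P p.1) → (∀ s, vd.contains s = true → vis.contains s = true) →
      ∃ t' vis₂, pvAgoList (fun b v => pvAgo td f b v) cs total vis = some (t', vis₂) ∧
        ∀ s, vis.contains s = true → vis₂.contains s = true := by
  intro cs
  induction cs with
  | nil => intro total vis _ _; exact ⟨total, vis, rfl, fun s h => h⟩
  | cons p rest ih =>
    obtain ⟨bag, count⟩ := p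
    intro total vis hP hsub
    obtain ⟨⟨⟨sub, n0⟩, visb⟩, hr, hmono⟩ := H bag vis (hP (bag, count) List.mem_cons_self) hsub
    obtain ⟨t', vis₂, hrec, hmono2⟩ := ih (total + count * (sub + 1)) visb
      (fun q hq => hP q (by simp [hq])) (fun s h => hmono s (hsub s h))
    exact ⟨t', vis₂, by simp [pvAgoList, hr, hrec], fun s h => hmono2 s (hmono s h)⟩

theorem pvChildLenLe (td : PySem.Dict String (List (String × Int))) (node : String) : (td.getD node []).length ≤ pvMaxChild td := by
  by_cases hc : td.contains node = true
  · rcases hg : td.get? node with _ | v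
    · rw [PySem.Dict.contains_eq_isSome_get?, hg] at hc; simp at hc
    · rw [PySem.Dict.getD_eq_get?_getD, hg]
      have hmem : (node, v) ∈ td.items := PySem.Dict.mem_items_of_get?_eq_some td hg
      have : v.length ∈ td.items.map (fun p => p.2.length) :=
        List.mem_map.mpr ⟨(node, v), hmem, rfl⟩
      simpa using (PySem.List.le_foldl_max (td.items.map (fun p => p.2.length)) 0).2 _ this
  · rw [PySem.Dict.getD_of_not_contains td [] (by simpa using hc)]
    exact Nat.zero_le _

theorem pvAdequate (td : PySem.Dict String (List (String × Int))) (vd : PySem.Dict String Int) :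
    ∀ (k : Nat) (node : String) (vis : PySem.Dict String Int) (fuel : Nat), k + 1 ≤ fuel →
      (∀ s, vd.contains s = true → vis.contains s = true) →
      (vis.contains node = true ∨ pvGood td vd k node = true) →
      ∃ r, pvAgo td fuel node vis = some r ∧ ∀ s, vis.contains s = true → r.2.contains s = true := by
  intro k
  induction k with
  | zero =>
    intro node vis fuel hfuel hsub hnode
    match fuel, hfuel with
    | f + 1, _ =>
    have hc : vis.contains node = true := by
      rcases hnode with h | h
      · exact h
      · exact hsub node (by simpa [pvGood] using h)
    exact ⟨((vis.getD node 0, (vis.size : Int)), vis), by simp [pvAgo, hc], fun s h => h⟩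
  | succ k IH =>
    intro node vis fuel hfuel hsub hnode
    match fuel, hfuel with
    | f + 1, hfuel =>
    by_cases hc : vis.contains node = true
    · exact ⟨((vis.getD node 0, (vis.size : Int)), vis), by simp [pvAgo, hc], fun s h => h⟩
    · have hg : pvGood td vd (k + 1) node = true := hnode.resolve_left hc
      simp only [pvGood, Bool.or_eq_true, Bool.and_eq_true, List.all_eq_true] at hg
      rcases hg with hg | ⟨_, hch⟩
      · exact IH node vis (f + 1) (by omega) hsub (Or.inr hg)
      · have H : ∀ bag vis0, pvGood td vd k bag = true →
            (∀ s, vd.contains s = true → vis0.contains s = true) →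
            ∃ r, pvAgo td f bag vis0 = some r ∧
              ∀ s, vis0.contains s = true → r.2.contains s = true := by
          intro bag vis0 hPb hsub0
          exact IH bag vis0 f (by omega) hsub0 (Or.inr hPb)
        obtain ⟨t', vis₂, hlist, hmono⟩ := pvListAdequate td vd f _ H (td.getD node []) 0 vis
          (fun p hp => hch p hp) hsub
        refine ⟨(((vis₂.insert node t').getD node 0, ((vis₂.insert node t').size : Int)),
            vis₂.insert node t'), ?_, ?_⟩
        · simp only [pvAgo, hc, Bool.false_eq_true, if_false, hlist]
        · intro s h
          rw [PySem.Dict.contains_insert]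
          simp [hmono s h]

theorem pvResumeSim (td : PySem.Dict String (List (String × Int))) (f : Nat)
    (IH : ∀ node vis v n vis', pvAgo td f node vis = some ((v, n), vis') →
      ∃ k, k ≤ (pvMaxChild td + 2) ^ f ∧ ∀ g rest ret,
        pvBrun td (k + g) ((node, 0, 0) :: rest) ret vis = pvBrun td g rest v vis') :
    ∀ (cs : List (String × Int)) (node : String) (i : Nat) (total ret : Int)
      (t' : Int) (vis vis₂ : PySem.Dict String Int),
      (td.getD node []).drop i = cs → 1 ≤ i →
      pvAgoList (fun b v => pvAgo td f b v) cs
        (total + (((td.getD node [])[i-1]?).getD ("", 0)).2 * (ret + 1)) vis = some (t', vis₂) →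
      ∃ k, k ≤ cs.length * ((pvMaxChild td + 2) ^ f + 1) + 1 ∧ ∀ g rest,
        pvBrun td (k + g) ((node, i, total) :: rest) ret vis =
          pvBrun td g rest t' (vis₂.insert node t') := by
  intro cs
  induction cs with
  | nil =>
    intro node i total ret t' vis vis₂ hdrop hi hA
    simp only [pvAgoList, Option.some.injEq, Prod.mk.injEq] at hA
    obtain ⟨hA1, hA2⟩ := hA
    have hlen : (td.getD node []).length ≤ i := by
      rw [← List.drop_eq_nil_iff]; exact hdrop
    have hnone : (td.getD node [])[i]? = none := by
      exact List.getElem?_eq_none hlen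
    have hi0 : (i == 0) = false := by simp; omega
    have hpos : 0 < i := hi
    refine ⟨1, by omega, ?_⟩
    intro g rest
    rw [Nat.add_comm 1 g]
    simp only [pvBrun, hi0, Bool.false_and, Bool.false_eq_true, if_false, hnone, hpos, if_pos]
    rw [hA1, hA2]
  | cons p cs' ihcs =>
    obtain ⟨bag, cnt⟩ := p
    intro node i total ret t' vis vis₂ hdrop hi hA
    have hget : (td.getD node [])[i]? = some (bag, cnt) := by
      have h0 : (List.drop i (td.getD node []))[0]? = some (bag, cnt) := by rw [hdrop]; rfl
      rw [List.getElem?_drop] at h0; simpa using h0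
    rcases hb : pvAgo td f bag vis with _ | ⟨⟨sub, nb⟩, visb⟩
    · rw [pvAgoList, hb] at hA; simp at hA
    · rw [pvAgoList, hb] at hA
      have hdrop' : (td.getD node []).drop (i + 1) = cs' := by
        have h1 : List.drop 1 (List.drop i (td.getD node [])) = List.drop (i + 1) (td.getD node []) := by
          rw [List.drop_drop, Nat.add_comm]
        rw [← h1, hdrop]; rfl
      have hAnext : pvAgoList (fun b v => pvAgo td f b v) cs'
          ((total + (((td.getD node [])[i-1]?).getD ("", 0)).2 * (ret + 1)) +
            (((td.getD node [])[(i+1)-1]?).getD ("", 0)).2 * (sub + 1)) visb = some (t', vis₂) := by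
        have : (i + 1) - 1 = i := by omega
        rw [this, hget]
        exact hA
      obtain ⟨k₂, hk₂, hrun₂⟩ := ihcs node (i+1)
        (total + (((td.getD node [])[i-1]?).getD ("", 0)).2 * (ret + 1)) sub t' visb vis₂
        hdrop' (by omega) hAnext
      obtain ⟨k₁, hk₁, hrun₁⟩ := IH bag vis sub nb visb hb
      have hi0 : (i == 0) = false := by simp; omega
      have hpos : 0 < i := hi
      refine ⟨1 + k₁ + k₂, ?_, ?_⟩
      · have e1 : (cs'.length + 1) * ((pvMaxChild td + 2) ^ f + 1)
            = cs'.length * ((pvMaxChild td + 2) ^ f + 1) + (pvMaxChild td + 2) ^ f + 1 := by ring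
        simp only [List.length_cons]; omega
      · intro g rest
        have e : 1 + k₁ + k₂ + g = (k₁ + (k₂ + g)) + 1 := by omega
        rw [e]
        simp only [pvBrun, hi0, Bool.false_and, Bool.false_eq_true, if_false, hget, hpos, if_pos]
        rw [hrun₁, hrun₂]

theorem pvSim (td : PySem.Dict String (List (String × Int))) :
    ∀ (f : Nat) (node : String) (vis : PySem.Dict String Int) (v n : Int) (vis' : PySem.Dict String Int),
      pvAgo td f node vis = some ((v, n), vis') →
      ∃ k, k ≤ (pvMaxChild td + 2) ^ f ∧ ∀ g rest ret,
        pvBrun td (k + g) ((node, 0, 0) :: rest) ret vis = pvBrun td g rest v vis' := by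
  intro f
  induction f with
  | zero => intro node vis v n vis' h; simp [pvAgo] at h
  | succ f IHf =>
    intro node vis v n vis' h
    by_cases hc : vis.contains node = true
    · simp only [pvAgo, hc, if_true, Option.some.injEq, Prod.mk.injEq] at h
      obtain ⟨⟨hv, hn⟩, hvis⟩ := h
      refine ⟨1, Nat.one_le_pow _ _ (by omega), ?_⟩
      intro g rest ret
      rw [Nat.add_comm 1 g]
      simp only [pvBrun, hc, Bool.and_true, beq_self_eq_true, if_pos]
      rw [hv, hvis]
    · rcases hl : pvAgoList (fun b v => pvAgo td f b v) (td.getD node []) 0 vis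
        with _ | ⟨t', vis₂⟩
      · rw [pvAgo, if_neg (by simp [hc]), hl] at h; simp at h
      · rw [pvAgo, if_neg (by simp [hc]), hl] at h
        simp only [Option.some.injEq, Prod.mk.injEq] at h
        obtain ⟨⟨hv, hn⟩, hvis⟩ := h
        have hv' : v = t' := by rw [← hv, PySem.Dict.getD_insert_self]
        rcases hch : td.getD node [] with _ | ⟨⟨bag, cnt⟩, cs'⟩
        · rw [hch] at hl
          simp only [pvAgoList, Option.some.injEq, Prod.mk.injEq] at hl
          obtain ⟨ht, hw⟩ := hl
          refine ⟨1, Nat.one_le_pow _ _ (by omega), ?_⟩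
          intro g rest ret
          rw [Nat.add_comm 1 g]
          have hnone : (td.getD node [])[0]? = none := by rw [hch]; rfl
          simp only [pvBrun, hc, Bool.and_false, Bool.false_eq_true, if_false, hnone]
          rw [← hvis, hv', ← ht, ← hw]
          simp
        · rw [hch] at hl
          rcases hb : pvAgo td f bag vis with _ | ⟨⟨sub, nb⟩, visb⟩
          · rw [pvAgoList, hb] at hl; simp at hl
          · rw [pvAgoList, hb] at hl
            rcases f with _ | f'
            · simp [pvAgo] at hb
            · have hdrop1 : (td.getD node []).drop 1 = cs' := by rw [hch]; rfl
              have hget0 : (td.getD node [])[0]? = some (bag, cnt) := by rw [hch]; rfl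
              obtain ⟨k₂, hk₂, hrun₂⟩ := pvResumeSim td (f'+1) IHf cs' node 1 0 sub t' visb vis₂
                hdrop1 (by omega)
                (by simp only [show (1:Nat)-1 = 0 from rfl, hget0, Option.getD_some]; simpa using hl)
              obtain ⟨k₁, hk₁, hrun₁⟩ := IHf bag vis sub nb visb hb
              refine ⟨1 + k₁ + k₂, ?_, ?_⟩
              · have hlen : cs'.length + 1 ≤ pvMaxChild td := by
                  have := pvChildLenLe td node
                  rw [hch] at this; simpa using this
                have hB : pvMaxChild td + 2 ≤ (pvMaxChild td + 2) ^ (f' + 1) :=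
                  Nat.le_self_pow (by omega) _
                set B := (pvMaxChild td + 2) ^ (f' + 1) with hBdef
                have step1 : 1 + k₁ + k₂ ≤ 1 + (cs'.length + 1) * (B + 1) := by
                  have e1 : (cs'.length + 1) * (B + 1) = cs'.length * (B + 1) + B + 1 := by ring
                  omega
                have step2 : (cs'.length + 1) * (B + 1) ≤ pvMaxChild td * (B + 1) :=
                  Nat.mul_le_mul_right _ hlen
                have step3 : pvMaxChild td * (B + 1) + 1 ≤ (pvMaxChild td + 2) * B := by
                  have e2 : pvMaxChild td * (B + 1) = pvMaxChild td * B + pvMaxChild td := by ring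
                  have e3 : (pvMaxChild td + 2) * B = pvMaxChild td * B + 2 * B := by ring
                  have h4 : pvMaxChild td + 1 ≤ 2 * B := by omega
                  omega
                calc 1 + k₁ + k₂ ≤ 1 + (cs'.length + 1) * (B + 1) := step1
                  _ ≤ 1 + pvMaxChild td * (B + 1) := by omega
                  _ ≤ (pvMaxChild td + 2) * B := by omega
                  _ = (pvMaxChild td + 2) ^ (f' + 1 + 1) := by rw [hBdef]; ring
              · intro g rest ret
                have e : 1 + k₁ + k₂ + g = (k₁ + (k₂ + g)) + 1 := by omega
                rw [e]
                simp only [pvBrun, hc, Bool.and_false, Bool.false_eq_true, if_false, hget0]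
                rw [hrun₁]
                have h2 := hrun₂ g rest
                rw [← hvis, hv']
                simpa using h2

theorem pvMainEq (current : String) (topology : List (String × List (String × Int)))
    (visited : Option (List (String × Int))) (hPre : Pre_traverse_topo current topology visited) :
    traverse_topo current topology visited = traverse_topo_alt current topology visited := by
  set td := PySem.Dict.ofList topology with htd
  set vd := (match visited with
    | none => (PySem.Dict.empty : PySem.Dict String Int)
    | some l => PySem.Dict.ofList l) with hvd
  simp only [Pre_traverse_topo] at hPre
  rw [← htd, ← hvd] at hPre
  have hEx : ∃ r, pvAgo td (topology.length + 1) current vd = some r := by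
    obtain ⟨r, hr, _⟩ := pvAdequate td vd topology.length current vd
      (topology.length + 1) (by omega) (fun s h => h) (Or.inr hPre)
    exact ⟨r, hr⟩
  obtain ⟨⟨⟨v, n⟩, vis'⟩, hA⟩ := hEx
  have hshape := pvAgo_shape td _ current vd _ hA
  obtain ⟨k, hk, hrun⟩ := pvSim td (topology.length + 1) current vd v n vis' hA
  have hF : pvBrun td ((pvMaxChild td + 2) ^ (topology.length + 1)) [(current, 0, 0)] 0 vd
      = some (v, vis') := by
    have h := hrun ((pvMaxChild td + 2) ^ (topology.length + 1) - k) [] 0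
    rw [Nat.add_sub_cancel' hk] at h
    rw [h]
    cases ((pvMaxChild td + 2) ^ (topology.length + 1) - k) <;> rfl
  simp only [traverse_topo, traverse_topo_alt, ← htd, ← hvd]
  rw [hA, hF]
  simp only at hshape
  rw [hshape]

-- ===== VERDICT (by name: the statement is the Claim_ definition above) =====
theorem traverse_topo_spec : Claim_equal_traverse_topo := by
  intro current topology visited _ hPre
  unfold Spec_traverse_topo
  exact pvMainEq current topology visited hPre
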